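-- pv_equiv track=rewrite | github.com/535921954/csc384artificialintelligence | a1/rushhour.py | get_board
-- ===== SOURCE A (Python) =====
-- def get_board(vehicle_statuses, board_properties):
--     #DO NOT CHANGE THIS FUNCTION---it will be used in auto marking
--     #and in generating sample trace output.
--     #Note that if you implement the "get" routines
--     #(rushhour.get_vehicle_statuses() and rushhour.get_board_size())
--     #properly, this function should work irrespective of how you represent
--     #your state.
--     (m, n) = board_properties[0]
--     board = [list(['.'] * n) for i in range(m)]
--     for vs in vehicle_statuses:
--         for i in range(vs[2]):  # vehicle length
--             if vs[3]:
--                 # vehicle is horizontal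
--                 board[vs[1][1]][(vs[1][0] + i) % n] = vs[0][0]
--                 # represent vehicle as first character of its name
--             else:
--                 # vehicle is vertical
--                 board[(vs[1][1] + i) % m][vs[1][0]] = vs[0][0]
--                 # represent vehicle as first character of its name
--     # print goal
--     board[board_properties[1][1]][board_properties[1][0]] = board_properties[2]
--     return board
-- ===== SOURCE B (Python) =====
-- def get_board(vehicle_statuses, board_properties):
--     # Per-cell gather: decide each cell's character directly by scanning vehicles in
--     # reverse (last placed wins) with an arithmetic coverage test, instead of
--     # scatter-writing every vehicle onto a mutable grid; then place the goal.
--     (m, n) = board_properties[0]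
--
--     def cell(r, c):
--         for name, (x, y), length, horizontal in reversed(vehicle_statuses):
--             if horizontal:
--                 if r == y % m and (c - x) % n < length:
--                     return name[0]
--             elif c == x % n and (r - y) % m < length:
--                 return name[0]
--         return '.'
--
--     board = [[cell(r, c) for c in range(n)] for r in range(m)]
--     (gx, gy) = board_properties[1]
--     board[gy][gx] = board_properties[2]
--     return board
-- ===== Notes on version B (the rewrite author's own statement) =====
-- stated objective: alternative
-- what changed: B inverts the construction: instead of scatter-writing each vehicle onto a pre-allocated mutable grid, it computes each cell independently by checking the goal coordinate and then scanning vehicles in reverse with a closed-form modular coverage test ((c-x)%n < length), so no grid mutation and no per-vehicle placement loop exist at all.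
import Mathlib
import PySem

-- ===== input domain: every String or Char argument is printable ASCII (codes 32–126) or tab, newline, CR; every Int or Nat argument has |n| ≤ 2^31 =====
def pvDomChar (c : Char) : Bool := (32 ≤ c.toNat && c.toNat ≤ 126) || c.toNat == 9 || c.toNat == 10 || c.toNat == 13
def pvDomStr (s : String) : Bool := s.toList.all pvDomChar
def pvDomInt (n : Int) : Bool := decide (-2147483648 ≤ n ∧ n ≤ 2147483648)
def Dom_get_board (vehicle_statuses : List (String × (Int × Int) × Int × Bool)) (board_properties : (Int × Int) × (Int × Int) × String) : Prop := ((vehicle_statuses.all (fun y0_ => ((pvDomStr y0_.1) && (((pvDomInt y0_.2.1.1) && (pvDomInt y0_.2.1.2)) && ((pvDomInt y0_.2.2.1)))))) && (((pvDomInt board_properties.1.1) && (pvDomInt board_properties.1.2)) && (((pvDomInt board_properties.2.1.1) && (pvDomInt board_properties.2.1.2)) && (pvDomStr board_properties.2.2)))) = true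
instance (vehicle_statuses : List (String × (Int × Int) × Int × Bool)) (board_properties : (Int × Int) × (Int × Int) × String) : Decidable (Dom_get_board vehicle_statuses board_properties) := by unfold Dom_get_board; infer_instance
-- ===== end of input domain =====

-- B decides every cell directly (reverse scan of vehicles with a modular coverage
-- test) instead of A's scatter-writes into a pre-allocated mutable grid; objective:
-- alternative structure, not speed. Equality is about the return value only.

-- Python s[0] as a 1-character string (vs[0][0] / name[0]); total here, but only
-- applied under Pre_ (name nonempty wherever it is evaluated)
def pvChar0 (s : String) : String := ((PySem.Str.pyGet? s 0).map (fun c => String.ofList [c])).getD ""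

-- ===== PORT A =====
-- Python list assignment xs[i] = v (negative index counts from the end; under Pre_ the
-- index is always in range, so the out-of-range 'else xs' branch is never taken on claimed inputs)
def pvSet1 {α : Type} (xs : List α) (i : Int) (v : α) : List α :=
  if -(xs.length : Int) ≤ i ∧ i < (xs.length : Int) then
    xs.set (PySem.Int.mod i (xs.length : Int)).toNat v
  else xs

-- Python board[r][c] = v on a list of rows
def pvSetCell (b : List (List String)) (r c : Int) (v : String) : List (List String) :=
  if -(b.length : Int) ≤ r ∧ r < (b.length : Int) then
    b.set (PySem.Int.mod r (b.length : Int)).toNat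
      (pvSet1 (b.getD (PySem.Int.mod r (b.length : Int)).toNat []) c v)
  else b

def get_board (vehicle_statuses : List (String × (Int × Int) × Int × Bool)) (board_properties : (Int × Int) × (Int × Int) × String) : List (List String) :=
  let m := board_properties.1.1
  let n := board_properties.1.2
  let board : List (List String) := (List.range m.toNat).map (fun _ => List.replicate n.toNat ".")
  let board := vehicle_statuses.foldl (fun board vs =>
    (List.range vs.2.2.1.toNat).foldl (fun board (i : Nat) =>
      if vs.2.2.2 then
        pvSetCell board vs.2.1.2 (PySem.Int.mod (vs.2.1.1 + (i : Int)) n) (pvChar0 vs.1)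
      else
        pvSetCell board (PySem.Int.mod (vs.2.1.2 + (i : Int)) m) vs.2.1.1 (pvChar0 vs.1)) board) board
  pvSetCell board board_properties.2.1.2 board_properties.2.1.1 board_properties.2.2

-- ===== PORT B =====
-- does vehicle vs cover cell (r, c)?  (B's per-vehicle test inside the reverse scan)
def pvCovers (m n : Int) (r c : Nat) (vs : String × (Int × Int) × Int × Bool) : Bool :=
  if vs.2.2.2 then
    ((r : Int) == PySem.Int.mod vs.2.1.2 m) && decide (PySem.Int.mod ((c : Int) - vs.2.1.1) n < vs.2.2.1)
  else
    ((c : Int) == PySem.Int.mod vs.2.1.1 n) && decide (PySem.Int.mod ((r : Int) - vs.2.1.2) m < vs.2.2.1)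

-- B's cell(r, c): reverse scan of the vehicles (first hit = last vehicle placed)
def pvCell (vehicle_statuses : List (String × (Int × Int) × Int × Bool)) (board_properties : (Int × Int) × (Int × Int) × String) (r c : Nat) : String :=
  match vehicle_statuses.reverse.find? (pvCovers board_properties.1.1 board_properties.1.2 r c) with
  | some vs => pvChar0 vs.1
  | none => "."

def get_board_alt (vehicle_statuses : List (String × (Int × Int) × Int × Bool)) (board_properties : (Int × Int) × (Int × Int) × String) : List (List String) :=
  let board := (List.range board_properties.1.1.toNat).map (fun r =>
    (List.range board_properties.1.2.toNat).map (fun c =>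
      pvCell vehicle_statuses board_properties r c))
  pvSetCell board board_properties.2.1.2 board_properties.2.1.1 board_properties.2.2

-- ===== PRECONDITION & SPEC =====
-- Pre_ is exactly the set of inputs on which the Python A returns: the goal coordinates must be
-- valid (possibly negative) Python indices, and every vehicle of positive length must have a
-- nonempty name and a valid fixed coordinate (IndexError / ZeroDivisionError otherwise).
def Pre_get_board (vehicle_statuses : List (String × (Int × Int) × Int × Bool)) (board_properties : (Int × Int) × (Int × Int) × String) : Prop :=
  (-board_properties.1.1 ≤ board_properties.2.1.2 ∧ board_properties.2.1.2 < board_properties.1.1) ∧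
  (-board_properties.1.2 ≤ board_properties.2.1.1 ∧ board_properties.2.1.1 < board_properties.1.2) ∧
  ∀ vs ∈ vehicle_statuses, 0 < vs.2.2.1 →
    vs.1 ≠ "" ∧
    (vs.2.2.2 = true → -board_properties.1.1 ≤ vs.2.1.2 ∧ vs.2.1.2 < board_properties.1.1) ∧
    (vs.2.2.2 = false → -board_properties.1.2 ≤ vs.2.1.1 ∧ vs.2.1.1 < board_properties.1.2)

instance (vehicle_statuses : List (String × (Int × Int) × Int × Bool)) (board_properties : (Int × Int) × (Int × Int) × String) : Decidable (Pre_get_board vehicle_statuses board_properties) := by unfold Pre_get_board; infer_instance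

def pvWitness_get_board : (List (String × (Int × Int) × Int × Bool)) × ((Int × Int) × (Int × Int) × String) :=
  ([("A", (0, 0), 2, true), ("b", (1, -2), 2, false)], ((3, 3), (2, 1), "G"))

def Spec_get_board (vehicle_statuses : List (String × (Int × Int) × Int × Bool)) (board_properties : (Int × Int) × (Int × Int) × String) (out : List (List String)) : Prop := out = get_board_alt vehicle_statuses board_properties
instance (vehicle_statuses : List (String × (Int × Int) × Int × Bool)) (board_properties : (Int × Int) × (Int × Int) × String) (out : List (List String)) : Decidable (Spec_get_board vehicle_statuses board_properties out) := by unfold Spec_get_board; infer_instance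

-- ===== CLAIM =====
def Claim_equal_get_board : Prop := ∀ (vehicle_statuses : List (String × (Int × Int) × Int × Bool)) (board_properties : (Int × Int) × (Int × Int) × String), Dom_get_board vehicle_statuses board_properties → Pre_get_board vehicle_statuses board_properties → Spec_get_board vehicle_statuses board_properties (get_board vehicle_statuses board_properties)

-- ===== LEMMAS AND PROOFS =====

-- proof-only: the "last write wins" table both programs realize, as a dict fold
def pvVehFold (m n : Int) (vss : List (String × (Int × Int) × Int × Bool)) (d : PySem.Dict (Int × Int) String) : PySem.Dict (Int × Int) String :=
  vss.foldl (fun cells vs =>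
    (List.range vs.2.2.1.toNat).foldl (fun cells (i : Nat) =>
      if vs.2.2.2 then
        cells.insert (PySem.Int.mod vs.2.1.2 m, PySem.Int.mod (vs.2.1.1 + (i : Int)) n) (pvChar0 vs.1)
      else
        cells.insert (PySem.Int.mod (vs.2.1.2 + (i : Int)) m, PySem.Int.mod vs.2.1.1 n) (pvChar0 vs.1)) cells) d

def pvRow (n : Int) (cells : PySem.Dict (Int × Int) String) (r : Nat) : List String :=
  (List.range n.toNat).map (fun (c : Nat) => cells.getD ((r : Int), (c : Int)) ".")

def pvRender (m n : Int) (cells : PySem.Dict (Int × Int) String) : List (List String) :=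
  (List.range m.toNat).map (pvRow n cells)

lemma set_map_range {α : Type} (n : Nat) (f : Nat → α) (j : Nat) (v : α) :
    ((List.range n).map f).set j v
      = (List.range n).map (fun c => if c = j then v else f c) := by
  apply List.ext_getElem
  · simp
  · intro i h1 h2
    simp only [List.getElem_set, List.getElem_map, List.getElem_range] at *
    by_cases h : j = i
    · simp [h]
    · rw [if_neg h, if_neg (by omega)]

-- one Python write board[r][c] = v on a rendered dict equals one dict insert at the reduced key
lemma setCell_render (m n : Int) (d : PySem.Dict (Int × Int) String) (r c : Int) (v : String)
    (hr : -m ≤ r ∧ r < m) (hc : -n ≤ c ∧ c < n) :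
    pvSetCell (pvRender m n d) r c v
      = pvRender m n (d.insert (PySem.Int.mod r m, PySem.Int.mod c n) v) := by
  have hm : 0 < m := by omega
  have hn : 0 < n := by omega
  have hmn : ((m.toNat : Int)) = m := by omega
  have hnn : ((n.toNat : Int)) = n := by omega
  have hrm0 : 0 ≤ PySem.Int.mod r m := PySem.Int.mod_nonneg r hm
  have hrm1 : PySem.Int.mod r m < m := PySem.Int.mod_lt r hm
  have hcm0 : 0 ≤ PySem.Int.mod c n := PySem.Int.mod_nonneg c hn
  have hcm1 : PySem.Int.mod c n < n := PySem.Int.mod_lt c hn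
  have hlen : (pvRender m n d).length = m.toNat := by
    simp [pvRender]
  unfold pvSetCell
  rw [hlen, hmn, if_pos ⟨hr.1, hr.2⟩]
  have hrn : (PySem.Int.mod r m).toNat < m.toNat := by omega
  have hget : (pvRender m n d).getD (PySem.Int.mod r m).toNat [] = pvRow n d (PySem.Int.mod r m).toNat := by
    rw [List.getD_eq_getElem _ _ (by rw [hlen]; exact hrn)]
    simp only [pvRender, List.getElem_map, List.getElem_range]
  rw [hget]
  unfold pvSet1
  rw [show (pvRow n d (PySem.Int.mod r m).toNat).length = n.toNat by simp [pvRow], hnn,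
    if_pos ⟨hc.1, hc.2⟩]
  unfold pvRender pvRow
  rw [set_map_range, set_map_range]
  apply List.map_congr_left
  intro j hj
  simp only [List.mem_range] at hj
  by_cases hrEq : j = (PySem.Int.mod r m).toNat
  · rw [if_pos hrEq]
    apply List.map_congr_left
    intro cc hcc
    simp only [List.mem_range] at hcc
    rw [PySem.Dict.getD_insert]
    by_cases hcEq : cc = (PySem.Int.mod c n).toNat
    · rw [if_pos hcEq, if_pos (by subst hrEq hcEq; rw [Int.toNat_of_nonneg hrm0, Int.toNat_of_nonneg hcm0])]
    · rw [if_neg hcEq, if_neg (by intro h; apply hcEq; have := congrArg Prod.snd h; simp at this; omega)]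
      subst hrEq
      rfl
  · rw [if_neg hrEq]
    apply List.map_congr_left
    intro cc _
    rw [PySem.Dict.getD_insert,
      if_neg (by intro h; apply hrEq; have := congrArg Prod.fst h; simp at this; omega)]

-- self-reduction of an already-reduced coordinate
lemma mod_mod_self (a b : Int) (hb : 0 < b) :
    PySem.Int.mod (PySem.Int.mod a b) b = PySem.Int.mod a b := by
  have h0 := PySem.Int.mod_nonneg a hb
  have h1 := PySem.Int.mod_lt a hb
  rw [PySem.Int.mod_eq_emod_of_pos (a := PySem.Int.mod a b) hb, Int.emod_eq_of_lt h0 h1]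

-- the per-vehicle inner loop of A preserves "board = render of dict"
lemma inner_loop_render (m n : Int) (l : List Nat) (d : PySem.Dict (Int × Int) String)
    (x y : Int) (hor : Bool) (v : String)
    (hm : 0 < m) (hn : 0 < n)
    (hy : hor = true → -m ≤ y ∧ y < m) (hx : hor = false → -n ≤ x ∧ x < n) :
    l.foldl (fun board (i : Nat) =>
        if hor then pvSetCell board y (PySem.Int.mod (x + (i : Int)) n) v
        else pvSetCell board (PySem.Int.mod (y + (i : Int)) m) x v) (pvRender m n d)
      = pvRender m n (l.foldl (fun cells (i : Nat) =>
          if hor then cells.insert (PySem.Int.mod y m, PySem.Int.mod (x + (i : Int)) n) v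
          else cells.insert (PySem.Int.mod (y + (i : Int)) m, PySem.Int.mod x n) v) d) := by
  induction l generalizing d with
  | nil => rfl
  | cons i t ih =>
    simp only [List.foldl_cons]
    cases hor with
    | true =>
      rw [setCell_render m n d y (PySem.Int.mod (x + (i : Int)) n) v (hy rfl)
          ⟨by have := PySem.Int.mod_nonneg (x + (i : Int)) hn; omega, PySem.Int.mod_lt _ hn⟩,
        mod_mod_self _ _ hn]
      exact ih _
    | false =>
      simp only [Bool.false_eq_true, if_neg (by simp : ¬ (False : Prop))]
      rw [setCell_render m n d (PySem.Int.mod (y + (i : Int)) m) x v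
          ⟨by have := PySem.Int.mod_nonneg (y + (i : Int)) hm; omega, PySem.Int.mod_lt _ hm⟩ (hx rfl),
        mod_mod_self _ _ hm]
      exact ih _

-- the empty board is the render of the empty dict
lemma render_empty (m n : Int) :
    (List.range m.toNat).map (fun _ => List.replicate n.toNat ("." : String))
      = pvRender m n PySem.Dict.empty := by
  unfold pvRender pvRow
  apply List.map_congr_left
  intro r _
  simp only [PySem.Dict.getD_empty]
  rw [List.map_const', List.length_range]

-- the outer vehicle loop of A preserves "board = render of dict"
lemma outer_loop_render (m n : Int) (vss : List (String × (Int × Int) × Int × Bool))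
    (d : PySem.Dict (Int × Int) String) (hm : 0 < m) (hn : 0 < n)
    (hvs : ∀ vs ∈ vss, 0 < vs.2.2.1 →
      (vs.2.2.2 = true → -m ≤ vs.2.1.2 ∧ vs.2.1.2 < m) ∧
      (vs.2.2.2 = false → -n ≤ vs.2.1.1 ∧ vs.2.1.1 < n)) :
    vss.foldl (fun board vs =>
      (List.range vs.2.2.1.toNat).foldl (fun board (i : Nat) =>
        if vs.2.2.2 then
          pvSetCell board vs.2.1.2 (PySem.Int.mod (vs.2.1.1 + (i : Int)) n) (pvChar0 vs.1)
        else
          pvSetCell board (PySem.Int.mod (vs.2.1.2 + (i : Int)) m) vs.2.1.1 (pvChar0 vs.1)) board)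
      (pvRender m n d)
      = pvRender m n (pvVehFold m n vss d) := by
  induction vss generalizing d with
  | nil => rfl
  | cons vs t ih =>
    simp only [List.foldl_cons, pvVehFold] at *
    by_cases hL : 0 < vs.2.2.1
    · rw [inner_loop_render m n _ d vs.2.1.1 vs.2.1.2 vs.2.2.2 (pvChar0 vs.1) hm hn
        (hvs vs (by simp) hL).1 (hvs vs (by simp) hL).2]
      exact ih _ (fun w hw => hvs w (by simp [hw]))
    · have h0 : vs.2.2.1.toNat = 0 := by omega
      rw [h0]
      simp only [List.range_zero, List.foldl_nil]
      exact ih d (fun w hw => hvs w (by simp [hw]))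

-- generic: getD after a fold of same-value inserts is an existence test on the keys
lemma getD_foldl_insert (l : List Nat) (k : Nat → Int × Int) (v : String)
    (d : PySem.Dict (Int × Int) String) (key : Int × Int) :
    ((l.foldl (fun d i => d.insert (k i) v) d).getD key ".")
      = if l.any (fun i => decide (key = k i)) then v else d.getD key "." := by
  induction l generalizing d with
  | nil => simp
  | cons i t ih =>
    simp only [List.foldl_cons, List.any_cons, ih, PySem.Dict.getD_insert]
    by_cases h : key = k i
    · simp [h]
    · simp [h]

-- ∃ i < L, c = (x+i) mod n  ⟺  (c-x) mod n < L   (for a cell column 0 ≤ c < n)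
lemma exists_shift (x n L c : Int) (hn : 0 < n) (hc0 : 0 ≤ c) (hcn : c < n) :
    (∃ i : Nat, i < L.toNat ∧ c = PySem.Int.mod (x + (i : Int)) n) ↔ PySem.Int.mod (c - x) n < L := by
  have hne : n ≠ 0 := by omega
  simp only [PySem.Int.mod_eq_emod_of_pos hn]
  constructor
  · rintro ⟨i, hi, hce⟩
    have key : (c - x) % n = (i : Int) % n := by
      rw [hce, Int.sub_emod, Int.emod_emod_of_dvd _ dvd_rfl, ← Int.sub_emod]
      congr 1
      ring
    have h2 : (i : Int) % n < n := Int.emod_lt_of_pos _ hn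
    by_cases hin : (i : Int) < n
    · rw [Int.emod_eq_of_lt (by positivity) hin] at key
      omega
    · omega
  · intro h
    have hj0 : 0 ≤ (c - x) % n := Int.emod_nonneg _ hne
    have hjn : (c - x) % n < n := Int.emod_lt_of_pos _ hn
    refine ⟨((c - x) % n).toNat, by omega, ?_⟩
    have hcast : (((((c - x) % n).toNat : Nat)) : Int) = (c - x) % n := by omega
    rw [hcast, Int.add_emod, Int.emod_emod_of_dvd _ dvd_rfl, ← Int.add_emod]
    have : x + (c - x) = c := by ring
    rw [this, Int.emod_eq_of_lt hc0 hcn]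

-- one vehicle's insert burst, read back at a cell: exactly B's coverage test
lemma inner_getD (m n : Int) (hm : 0 < m) (hn : 0 < n) (r c : Nat)
    (hr : (r : Int) < m) (hc : (c : Int) < n)
    (vs : String × (Int × Int) × Int × Bool) (d : PySem.Dict (Int × Int) String) :
    (((List.range vs.2.2.1.toNat).foldl (fun cells (i : Nat) =>
        if vs.2.2.2 then
          cells.insert (PySem.Int.mod vs.2.1.2 m, PySem.Int.mod (vs.2.1.1 + (i : Int)) n) (pvChar0 vs.1)
        else
          cells.insert (PySem.Int.mod (vs.2.1.2 + (i : Int)) m, PySem.Int.mod vs.2.1.1 n) (pvChar0 vs.1)) d).getD ((r : Int), (c : Int)) ".")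
      = if pvCovers m n r c vs then pvChar0 vs.1 else d.getD ((r : Int), (c : Int)) "." := by
  obtain ⟨name, ⟨x, y⟩, L, hor⟩ := vs
  cases hor with
  | true =>
    simp only [if_true]
    rw [getD_foldl_insert _ (fun i => (PySem.Int.mod y m, PySem.Int.mod (x + (i : Int)) n)) _ d]
    have hb : ((List.range L.toNat).any (fun i => decide (((r : Int), (c : Int)) = (PySem.Int.mod y m, PySem.Int.mod (x + (i : Int)) n))))
        = pvCovers m n r c (name, (x, y), L, true) := by
      rw [Bool.eq_iff_iff]
      simp only [pvCovers, if_true, List.any_eq_true, List.mem_range, decide_eq_true_eq,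
        Bool.and_eq_true, beq_iff_eq, Prod.mk.injEq]
      constructor
      · rintro ⟨i, hi, h1, h2⟩
        exact ⟨h1, by simpa using (exists_shift x n L (c : Int) hn (by positivity) hc).mp ⟨i, hi, h2⟩⟩
      · rintro ⟨h1, h2⟩
        obtain ⟨i, hi, h3⟩ := (exists_shift x n L (c : Int) hn (by positivity) hc).mpr (by simpa using h2)
        exact ⟨i, hi, h1, h3⟩
    rw [hb]
  | false =>
    simp only [Bool.false_eq_true, if_neg (by simp : ¬ (False : Prop))]
    rw [getD_foldl_insert _ (fun i => (PySem.Int.mod (y + (i : Int)) m, PySem.Int.mod x n)) _ d]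
    have hb : ((List.range L.toNat).any (fun i => decide (((r : Int), (c : Int)) = (PySem.Int.mod (y + (i : Int)) m, PySem.Int.mod x n))))
        = pvCovers m n r c (name, (x, y), L, false) := by
      rw [Bool.eq_iff_iff]
      simp only [pvCovers, Bool.false_eq_true, if_neg (by simp : ¬ (False : Prop)),
        List.any_eq_true, List.mem_range, decide_eq_true_eq, Bool.and_eq_true, beq_iff_eq,
        Prod.mk.injEq]
      constructor
      · rintro ⟨i, hi, h1, h2⟩
        exact ⟨h2, by simpa using (exists_shift y m L (r : Int) hm (by positivity) hr).mp ⟨i, hi, h1⟩⟩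
      · rintro ⟨h1, h2⟩
        obtain ⟨i, hi, h3⟩ := (exists_shift y m L (r : Int) hm (by positivity) hr).mpr (by simpa using h2)
        exact ⟨i, hi, h3, h1⟩
    rw [hb]

-- the whole vehicle fold, read back at a cell: B's reverse scan
lemma outer_getD (m n : Int) (hm : 0 < m) (hn : 0 < n) (r c : Nat)
    (hr : (r : Int) < m) (hc : (c : Int) < n)
    (vss : List (String × (Int × Int) × Int × Bool)) (d : PySem.Dict (Int × Int) String) :
    ((pvVehFold m n vss d).getD ((r : Int), (c : Int)) ".")
      = match vss.reverse.find? (pvCovers m n r c) with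
        | some vs => pvChar0 vs.1
        | none => d.getD ((r : Int), (c : Int)) "." := by
  induction vss generalizing d with
  | nil => rfl
  | cons vs t ih =>
    simp only [pvVehFold, List.foldl_cons, List.reverse_cons, List.find?_append]
    rw [show (t.foldl _ _ : PySem.Dict (Int × Int) String) = pvVehFold m n t
        ((List.range vs.2.2.1.toNat).foldl (fun cells (i : Nat) =>
          if vs.2.2.2 then
            cells.insert (PySem.Int.mod vs.2.1.2 m, PySem.Int.mod (vs.2.1.1 + (i : Int)) n) (pvChar0 vs.1)
          else
            cells.insert (PySem.Int.mod (vs.2.1.2 + (i : Int)) m, PySem.Int.mod vs.2.1.1 n) (pvChar0 vs.1)) d) from rfl,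
      ih]
    cases hfind : t.reverse.find? (pvCovers m n r c) with
    | some w => simp
    | none =>
      rw [inner_getD m n hm hn r c hr hc vs d]
      by_cases hcov : pvCovers m n r c vs
      · simp [List.find?, hcov]
      · simp [List.find?, hcov]

-- ===== VERDICT =====
theorem get_board_spec : Claim_equal_get_board := by
  intro vss bp _ hpre
  obtain ⟨hgy, hgx, hvs⟩ := hpre
  unfold Spec_get_board
  show get_board vss bp = get_board_alt vss bp
  have hm : 0 < bp.1.1 := by omega
  have hn : 0 < bp.1.2 := by omega
  unfold get_board get_board_alt
  dsimp only
  rw [render_empty, outer_loop_render bp.1.1 bp.1.2 vss PySem.Dict.empty hm hn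
      (fun vs h hL => ⟨((hvs vs h) hL).2.1, ((hvs vs h) hL).2.2⟩)]
  congr 1
  unfold pvRender pvRow
  apply List.map_congr_left
  intro r hr
  simp only [List.mem_range] at hr
  apply List.map_congr_left
  intro c hc
  simp only [List.mem_range] at hc
  rw [outer_getD bp.1.1 bp.1.2 hm hn r c (by omega) (by omega) vss PySem.Dict.empty]
  unfold pvCell
  cases hfind : vss.reverse.find? (pvCovers bp.1.1 bp.1.2 r c) with
  | some w => rfl
  | none => simp [PySem.Dict.getD_empty]
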